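-- pv_equiv track=rewrite | github.com/shatianming5/OpenCode-FSM-Runner | runner/plan_format.py | _extract_section_lines
-- ===== SOURCE A (Python) =====
-- def _extract_section_lines(lines: list[str], heading_prefix: str) -> list[str] | None:
--     start = None
--     for i, line in enumerate(lines):
--         if line.strip().startswith(heading_prefix):
--             start = i + 1
--             break
--     if start is None:
--         return None
--     end = len(lines)
--     for j in range(start, len(lines)):
--         if lines[j].strip().startswith("## "):
--             end = j
--             break
--     return lines[start:end]
-- ===== SOURCE B (Python) =====
-- def _extract_section_lines(lines: list[str], heading_prefix: str) -> list[str] | None: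
--     found = False
--     out = []
--     for line in lines:
--         if found:
--             if line.strip().startswith("## "):
--                 break
--             out.append(line)
--         elif line.strip().startswith(heading_prefix):
--             found = True
--     return out if found else None
-- ===== Notes on version B (the rewrite author's own statement) =====
-- stated objective: simpler
-- what changed: Replaces A's two index-based scans (enumerate to find the heading index, range scan for the next '## ' heading, then a slice) with one flag-and-accumulator pass over the lines that appends section lines directly.
import Mathlib
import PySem

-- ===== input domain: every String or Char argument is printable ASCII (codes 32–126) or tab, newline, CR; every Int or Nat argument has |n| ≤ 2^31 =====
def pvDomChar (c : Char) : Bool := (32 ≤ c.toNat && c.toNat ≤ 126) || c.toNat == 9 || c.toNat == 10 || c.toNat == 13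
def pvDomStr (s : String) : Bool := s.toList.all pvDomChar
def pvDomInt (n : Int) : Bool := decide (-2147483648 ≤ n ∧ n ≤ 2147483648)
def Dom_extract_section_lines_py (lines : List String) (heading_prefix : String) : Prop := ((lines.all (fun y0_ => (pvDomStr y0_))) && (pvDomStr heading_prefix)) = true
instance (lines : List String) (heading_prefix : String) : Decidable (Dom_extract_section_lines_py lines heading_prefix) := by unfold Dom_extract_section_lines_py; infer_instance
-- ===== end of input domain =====

-- B replaces A's two index-based scans plus a slice with one flag-and-accumulator pass; equivalence proved on Dom (A is total).


-- ===== PORT A =====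
-- first loop: enumerate lines, break at the first line whose strip() starts with heading_prefix, start = i + 1
def aFindStart (heading_prefix : String) : List String → Nat → Option Nat
  | [], _ => none
  | l :: rest, i =>
      if PySem.Str.startswith (PySem.Str.strip l) heading_prefix then some (i + 1)
      else aFindStart heading_prefix rest (i + 1)

-- second loop: for j in range(start, len(lines)), break at the first '## ' heading, else end = len(lines)
def aFindEnd (lines : List String) (j : Nat) : Nat :=
  if h : j < lines.length then
    if PySem.Str.startswith (PySem.Str.strip lines[j]) "## " then j
    else aFindEnd lines (j + 1)
  else lines.length
termination_by lines.length - j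

def extract_section_lines_py (lines : List String) (heading_prefix : String) : Option (List String) :=
  match aFindStart heading_prefix lines 0 with
  | none => none
  | some start =>
      some (PySem.List.slice lines (some ((start : Nat) : Int)) (some ((aFindEnd lines start : Nat) : Int)))

-- ===== PORT B =====
-- 'found' phase of the single pass: append lines until a '## ' heading (break)
def bCollect : List String → List String
  | [] => []
  | l :: rest =>
      if PySem.Str.startswith (PySem.Str.strip l) "## " then []
      else l :: bCollect rest

-- 'not yet found' phase: scan for the heading line, which is itself not appended
def bLoop (heading_prefix : String) : List String → Option (List String)
  | [] => none
  | l :: rest =>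
      if PySem.Str.startswith (PySem.Str.strip l) heading_prefix then some (bCollect rest)
      else bLoop heading_prefix rest

def extract_section_lines_py_alt (lines : List String) (heading_prefix : String) : Option (List String) :=
  bLoop heading_prefix lines

-- ===== PRECONDITION & SPEC =====
def Spec_extract_section_lines_py (lines : List String) (heading_prefix : String) (out : Option (List String)) : Prop := out = extract_section_lines_py_alt lines heading_prefix
instance (lines : List String) (heading_prefix : String) (out : Option (List String)) : Decidable (Spec_extract_section_lines_py lines heading_prefix out) := by unfold Spec_extract_section_lines_py; infer_instance

-- ===== CLAIM (what is proved, stated in full; the proofs are below) =====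
def Claim_equal_extract_section_lines_py : Prop := ∀ (lines : List String) (heading_prefix : String), Dom_extract_section_lines_py lines heading_prefix → Spec_extract_section_lines_py lines heading_prefix (extract_section_lines_py lines heading_prefix)

-- ===== LEMMAS AND PROOFS =====
theorem aFindEnd_ge (lines : List String) (j : Nat) (h : j ≤ lines.length) :
    j ≤ aFindEnd lines j := by
  unfold aFindEnd
  split
  · split
    · exact Nat.le_refl j
    · have := aFindEnd_ge lines (j + 1) (by omega)
      omega
  · omega
termination_by lines.length - j

theorem aFindEnd_take (lines : List String) (j : Nat) (h : j ≤ lines.length) :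
    (lines.drop j).take (aFindEnd lines j - j) = bCollect (lines.drop j) := by
  by_cases hj : j < lines.length
  · rw [List.drop_eq_getElem_cons hj]
    unfold aFindEnd
    rw [dif_pos hj]
    simp only [bCollect]
    by_cases hq : PySem.Str.startswith (PySem.Str.strip lines[j]) "## " = true
    · rw [if_pos hq, if_pos hq]
      simp
    · rw [if_neg hq, if_neg hq]
      have hge := aFindEnd_ge lines (j + 1) (by omega)
      have ih := aFindEnd_take lines (j + 1) (by omega)
      have harith : aFindEnd lines (j + 1) - j = (aFindEnd lines (j + 1) - (j + 1)) + 1 := by omega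
      rw [harith, List.take_succ_cons, ih]
  · have hje : j = lines.length := by omega
    subst hje
    unfold aFindEnd
    rw [dif_neg hj]
    simp [bCollect]
termination_by lines.length - j

theorem aFindStart_bounds (heading_prefix : String) (lines : List String) (i s : Nat)
    (h : aFindStart heading_prefix lines i = some s) : i < s ∧ s ≤ i + lines.length := by
  induction lines generalizing i with
  | nil => simp [aFindStart] at h
  | cons l rest ih =>
    unfold aFindStart at h
    split at h
    · injection h with h'
      simp only [List.length_cons]
      omega
    · have := ih (i + 1) h
      simp only [List.length_cons]
      omega

theorem aFindStart_bLoop (heading_prefix : String) (lines : List String) (i : Nat) :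
    (match aFindStart heading_prefix lines i with
      | none => none
      | some s => some (bCollect (lines.drop (s - i)))) = bLoop heading_prefix lines := by
  induction lines generalizing i with
  | nil => rfl
  | cons l rest ih =>
    unfold aFindStart bLoop
    by_cases hp : PySem.Str.startswith (PySem.Str.strip l) heading_prefix = true
    · rw [if_pos hp, if_pos hp]
      have h1 : i + 1 - i = 1 := by omega
      simp [h1]
    · rw [if_neg hp, if_neg hp]
      rw [← ih (i + 1)]
      cases hfs : aFindStart heading_prefix rest (i + 1) with
      | none => rfl
      | some s =>
        have hb := aFindStart_bounds heading_prefix rest (i + 1) s hfs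
        simp only
        have harith : s - i = (s - (i + 1)) + 1 := by omega
        rw [harith, List.drop_succ_cons]

-- ===== VERDICT (by name: the statement is the Claim_ definition above) =====
theorem extract_section_lines_py_spec : Claim_equal_extract_section_lines_py := by
  intro lines heading_prefix _
  unfold Spec_extract_section_lines_py extract_section_lines_py extract_section_lines_py_alt
  rw [← aFindStart_bLoop heading_prefix lines 0]
  cases hfs : aFindStart heading_prefix lines 0 with
  | none => rfl
  | some s =>
    have hb := aFindStart_bounds heading_prefix lines 0 s hfs
    simp only
    rw [PySem.List.slice_natCast]
    rw [aFindEnd_take lines s (by omega)]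
    simp
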